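-- pv_equiv track=rewrite | github.com/Spawn12/Python_Basics | Mid_term.py | func
-- ===== SOURCE A (Python) =====
-- def func (a,b):
--     total=0
--     new_list=[]
--     list=0
--     for x in range(0,len(a)):
--         for y in range(0,len(b)):
--             if x==y:
--                 total=(a[x]*b[y])+total
--                 list=a[x]*b[y]
--                 new_list.append(list)
--     return total,new_list
-- ===== SOURCE B (Python) =====
-- def func(a, b):
--     products = [x * y for x, y in zip(a, b)]
--     return sum(products), products
-- ===== Notes on version B (the rewrite author's own statement) =====
-- stated objective: faster
-- what changed: Replaced the O(n*m) nested loops (matching indices x==y) by a single pass over zip(a,b), computing the products list once and summing it.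
import Mathlib
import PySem

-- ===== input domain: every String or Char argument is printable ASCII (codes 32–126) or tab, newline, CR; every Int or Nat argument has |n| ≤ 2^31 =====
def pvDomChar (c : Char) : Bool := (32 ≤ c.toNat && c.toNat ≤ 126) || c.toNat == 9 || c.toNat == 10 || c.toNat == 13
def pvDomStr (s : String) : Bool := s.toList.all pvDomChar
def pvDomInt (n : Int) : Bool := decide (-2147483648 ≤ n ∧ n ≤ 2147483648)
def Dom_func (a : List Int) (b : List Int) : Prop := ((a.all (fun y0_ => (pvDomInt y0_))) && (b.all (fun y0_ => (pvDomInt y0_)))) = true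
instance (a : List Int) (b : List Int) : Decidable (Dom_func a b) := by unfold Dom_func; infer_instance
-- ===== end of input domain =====

-- B replaces A's O(n*m) nested index-matching loops by one pass over zip(a,b); same return value.

-- ===== PORT A =====
-- inner loop of A (for y in range(0,len(b)): if x==y: …), state = (total, new_list, list)
def funcStep (a : List Int) (b : List Int) (s : Int × List Int × Int) (x : Nat) : Int × List Int × Int :=
  (List.range b.length).foldl
    (fun s y => if x = y then (a[x]! * b[y]! + s.1, s.2.1 ++ [a[x]! * b[y]!], a[x]! * b[y]!) else s) s

def func (a : List Int) (b : List Int) : Int × List Int :=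
  let s := (List.range a.length).foldl (funcStep a b) (0, [], 0)
  (s.1, s.2.1)

-- ===== PORT B =====
def func_alt (a : List Int) (b : List Int) : Int × List Int :=
  let products := (a.zip b).map (fun p => p.1 * p.2)
  (products.sum, products)

-- ===== PRECONDITION & SPEC =====
def Spec_func (a : List Int) (b : List Int) (out : Int × List Int) : Prop := out = func_alt a b
instance (a : List Int) (b : List Int) (out : Int × List Int) : Decidable (Spec_func a b out) := by unfold Spec_func; infer_instance

-- ===== CLAIM (what is proved, stated in full; the proofs are below) =====
def Claim_equal_func : Prop := ∀ (a : List Int) (b : List Int), Dom_func a b → Spec_func a b (func a b)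

-- ===== LEMMAS AND PROOFS =====

-- folding "if x = y then F s y else s" over range m fires exactly once, at y = x, iff x < m
theorem inner_fold {S : Type} (x m : Nat) (F : S → Nat → S) (s : S) :
    (List.range m).foldl (fun s y => if x = y then F s y else s) s
      = if x < m then F s x else s := by
  induction m with
  | zero => simp
  | succ m ih =>
    rw [List.range_succ, List.foldl_append, ih]
    by_cases h : x = m
    · subst h; simp
    · have hne : ¬ x = m := h
      by_cases hlt : x < m
      · simp [hne, hlt, Nat.lt_succ_of_lt hlt]
      · have : ¬ x < m + 1 := by omega
        simp [hne, hlt, this]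

theorem funcStep_eq (a b : List Int) (s : Int × List Int × Int) (x : Nat) :
    funcStep a b s x
      = if x < b.length then (a[x]! * b[x]! + s.1, s.2.1 ++ [a[x]! * b[x]!], a[x]! * b[x]!) else s := by
  unfold funcStep; rw [inner_fold]

def prods (a : List Int) (b : List Int) : List Int := (a.zip b).map (fun p => p.1 * p.2)

theorem prods_getElem (a b : List Int) (n : Nat) (ha : n < a.length) (hb : n < b.length) :
    (prods a b)[n]'(by simp [prods]; omega) = a[n]! * b[n]! := by
  simp [prods, List.getElem_zip, getElem!_pos, ha, hb]

theorem outer_fold (a b : List Int) (n : Nat) (hn : n ≤ a.length) :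
    ((List.range n).foldl (funcStep a b) (0, [], 0)).1 = ((prods a b).take n).sum ∧
    ((List.range n).foldl (funcStep a b) (0, [], 0)).2.1 = (prods a b).take n := by
  induction n with
  | zero => simp
  | succ n ih =>
    obtain ⟨h1, h2⟩ := ih (by omega)
    rw [List.range_succ, List.foldl_append, List.foldl_cons, List.foldl_nil, funcStep_eq]
    by_cases hb : n < b.length
    · have ha : n < a.length := by omega
      have hp : n < (prods a b).length := by simp [prods]; omega
      have htake : (prods a b).take (n + 1) = (prods a b).take n ++ [a[n]! * b[n]!] := by
        rw [List.take_add_one, List.getElem?_eq_getElem hp, prods_getElem a b n ha hb]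
        rfl
      simp [hb, h1, h2, htake, List.sum_append]
      ring
    · have hlen : (prods a b).length ≤ n := by simp [prods]; omega
      have htake : ∀ k, n ≤ k → (prods a b).take k = (prods a b).take n := by
        intro k hk
        rw [List.take_of_length_le hlen, List.take_of_length_le (by omega)]
      simp [hb, h1, h2, htake (n + 1) (by omega)]

-- ===== VERDICT (by name: the statement is the Claim_ definition above) =====
theorem func_spec : Claim_equal_func := by
  intro a b _
  unfold Spec_func func func_alt
  obtain ⟨h1, h2⟩ := outer_fold a b a.length (le_refl _)
  have hlen : (prods a b).length ≤ a.length := by simp [prods]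
  rw [List.take_of_length_le hlen] at h1 h2
  simp only [prods] at h1 h2
  exact Prod.ext h1 h2
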